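-- pv_equiv track=rewrite | github.com/SeongrokKim/python-practice | programmers/위클리 챌린지/부족한 금액 계산하기.py | solution
-- ===== SOURCE A (Python) =====
-- def solution(price, money, count):
--     need = 0
--     for i in range(1, count+1):
--         need += price*i
--     if need>money:
--         answer = need-money
--     else:
--         answer = 0
--     return answer
-- ===== SOURCE B (Python) =====
-- def solution(price, money, count):
--     c = count if count > 0 else 0
--     need = price * c * (c + 1) // 2
--     short = need - money
--     return short if short > 0 else 0
-- ===== Notes on version B (the rewrite author's own statement) =====
-- stated objective: faster
-- what changed: Replaces the O(count) summation loop with the closed-form arithmetic-series formula price*c*(c+1)//2.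
import Mathlib
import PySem

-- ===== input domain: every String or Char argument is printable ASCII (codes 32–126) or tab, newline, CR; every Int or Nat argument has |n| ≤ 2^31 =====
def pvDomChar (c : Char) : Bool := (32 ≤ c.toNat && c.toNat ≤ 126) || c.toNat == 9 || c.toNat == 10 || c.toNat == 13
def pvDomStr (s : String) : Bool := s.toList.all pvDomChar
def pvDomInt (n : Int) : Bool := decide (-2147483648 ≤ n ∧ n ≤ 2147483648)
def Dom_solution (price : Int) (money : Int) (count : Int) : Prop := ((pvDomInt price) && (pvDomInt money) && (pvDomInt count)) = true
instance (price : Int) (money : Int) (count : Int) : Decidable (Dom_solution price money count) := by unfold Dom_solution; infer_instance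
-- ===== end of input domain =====

-- B replaces A's O(count) summation loop with the closed-form arithmetic-series formula (faster).


-- ===== PORT A =====
def solution (price : Int) (money : Int) (count : Int) : Int :=
  let need := (PySem.List.pyRange 1 (count + 1) 1).foldl (fun need i => need + price * i) 0
  if need > money then need - money else 0

-- ===== PORT B =====
def solution_alt (price : Int) (money : Int) (count : Int) : Int :=
  let c := if count > 0 then count else 0
  let need := PySem.Int.floordiv (price * c * (c + 1)) 2
  let short := need - money
  if short > 0 then short else 0

-- ===== PRECONDITION & SPEC =====
def Spec_solution (price : Int) (money : Int) (count : Int) (out : Int) : Prop := out = solution_alt price money count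
instance (price : Int) (money : Int) (count : Int) (out : Int) : Decidable (Spec_solution price money count out) := by unfold Spec_solution; infer_instance

-- ===== CLAIM (what is proved, stated in full; the proofs are below) =====
def Claim_equal_solution : Prop := ∀ (price : Int) (money : Int) (count : Int), Dom_solution price money count → Spec_solution price money count (solution price money count)

-- ===== LEMMAS AND PROOFS =====

theorem pv_sum_loop (price : Int) : ∀ (n : Nat) (acc : Int),
    2 * ((PySem.List.pyRange 1 ((n : Int) + 1) 1).foldl (fun need i => need + price * i) acc)
      = 2 * acc + price * (n : Int) * ((n : Int) + 1) := by
  intro n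
  induction n with
  | zero => intro acc; simp [PySem.List.pyRange_one_eq_nil]
  | succ k ih =>
    intro acc
    have h : (1 : Int) ≤ (k : Int) + 1 := by omega
    rw [show ((((k : Nat) + 1 : Nat) : Int) + 1) = (((k : Int) + 1) + 1) by push_cast; ring,
        PySem.List.pyRange_one_succ_right h, List.foldl_append]
    simp only [List.foldl]
    rw [mul_add, ih acc]
    push_cast
    ring

theorem pv_eq (price money count : Int) : solution price money count = solution_alt price money count := by
  unfold solution solution_alt
  dsimp only
  by_cases hc : count > 0
  · have hcn : count = ((count.toNat : Nat) : Int) := by omega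
    have hs := pv_sum_loop price count.toNat 0
    rw [← hcn] at hs
    have hneed : (PySem.List.pyRange 1 (count + 1) 1).foldl (fun need i => need + price * i) 0
        = PySem.Int.floordiv (price * count * (count + 1)) 2 := by
      have : price * count * (count + 1)
          = 2 * ((PySem.List.pyRange 1 (count + 1) 1).foldl (fun need i => need + price * i) 0) := by
        rw [hs]; ring
      rw [this, PySem.Int.floordiv]
      exact (Int.mul_fdiv_cancel_left _ (by norm_num)).symm
    have hif : (if count > 0 then count else 0) = count := if_pos hc
    rw [hif, hneed]
    generalize PySem.Int.floordiv (price * count * (count + 1)) 2 = X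
    split_ifs <;> omega
  · have hnil : PySem.List.pyRange 1 (count + 1) 1 = [] :=
      PySem.List.pyRange_one_eq_nil (by omega)
    rw [hnil]
    simp only [List.foldl, if_neg hc]
    have : PySem.Int.floordiv (price * 0 * (0 + 1)) 2 = 0 := by
      rw [PySem.Int.floordiv]; norm_num
    rw [this]
    split_ifs <;> omega

-- ===== VERDICT (by name: the statement is the Claim_ definition above) =====
theorem solution_spec : Claim_equal_solution := by
  intro price money count _
  unfold Spec_solution
  exact pv_eq price money count
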